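-- pv_equiv track=rewrite | github.com/lizasot/Python-Intro | Introduction/Seminar2/task21.py | has_second_str
-- ===== SOURCE A (Python) =====
-- def has_second_str(l : list, s : str):
--     met : bool = 0
--     for x in range(0,len(l)):
--         if s == l[x]:
--             if met == 1:
--                 return x
--             else:
--                 met = 1
--     return -1
-- ===== SOURCE B (Python) =====
-- def has_second_str(l : list, s : str):
--     positions = {}
--     for i, x in enumerate(l):
--         positions[x] = positions.get(x, []) + [i]
--     occ = positions.get(s, [])
--     return occ[1] if len(occ) > 1 else -1
-- ===== Notes on version B (the rewrite author's own statement) =====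
-- stated objective: alternative
-- what changed: Instead of a flagged linear scan with early return, B builds in one pass a dictionary grouping every element to the list of its indices, then looks up s and returns the second recorded index (or -1 if fewer than two).
import Mathlib
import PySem

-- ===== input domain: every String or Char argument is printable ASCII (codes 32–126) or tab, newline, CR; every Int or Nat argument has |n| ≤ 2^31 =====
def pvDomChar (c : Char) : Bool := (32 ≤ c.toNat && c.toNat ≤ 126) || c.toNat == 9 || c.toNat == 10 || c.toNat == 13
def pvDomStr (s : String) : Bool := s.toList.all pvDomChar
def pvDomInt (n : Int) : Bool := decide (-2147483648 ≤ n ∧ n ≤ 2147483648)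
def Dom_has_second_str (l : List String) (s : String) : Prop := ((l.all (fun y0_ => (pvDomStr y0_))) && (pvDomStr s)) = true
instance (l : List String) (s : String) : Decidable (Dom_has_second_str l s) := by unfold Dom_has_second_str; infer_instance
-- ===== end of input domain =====

-- B replaces A's flagged early-return scan by building an index-grouping dictionary once and
-- reading off the second recorded index of s (alternative decomposition, same cost).

-- ===== PORT A =====
-- the 'for x in range(0,len(l))' loop with early return and the met flag, as index recursion
def hasSecondLoop (l : List String) (s : String) (x : Nat) (met : Bool) : Int :=
  if h : x < l.length then
    if s == l[x] then
      if met then (x : Int)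
      else hasSecondLoop l s (x + 1) true
    else hasSecondLoop l s (x + 1) met
  else -1
termination_by l.length - x

def has_second_str (l : List String) (s : String) : Int :=
  hasSecondLoop l s 0 false

-- ===== PORT B =====
-- positions[x] = positions.get(x, []) + [i] over enumerate(l); then occ = positions.get(s, []);
-- occ[1] if len(occ) > 1 else -1
def has_second_str_alt (l : List String) (s : String) : Int :=
  let positions :=
    (PySem.List.enumerate l 0).foldl
      (fun d p => d.modify p.2 [] (· ++ [p.1])) (PySem.Dict.empty : PySem.Dict String (List Int))
  let occ := positions.getD s []
  if h : 1 < occ.length then occ[1] else -1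

-- ===== PRECONDITION & SPEC =====
def Spec_has_second_str (l : List String) (s : String) (out : Int) : Prop := out = has_second_str_alt l s
instance (l : List String) (s : String) (out : Int) : Decidable (Spec_has_second_str l s out) := by unfold Spec_has_second_str; infer_instance

-- ===== CLAIM (what is proved, stated in full; the proofs are below) =====
def Claim_equal_has_second_str : Prop := ∀ (l : List String) (s : String), Dom_has_second_str l s → Spec_has_second_str l s (has_second_str l s)

-- ===== LEMMAS AND PROOFS =====

-- the occurrence-position list of s in the suffix of l starting at x (absolute positions)
def occFrom (l : List String) (s : String) (x : Nat) : List Int :=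
  ((PySem.List.enumerate (l.drop x) (x : Int)).filter (fun p => p.2 == s)).map (·.1)

theorem occFrom_ge (l : List String) (s : String) (x : Nat) (h : l.length ≤ x) :
    occFrom l s x = [] := by
  simp [occFrom, List.drop_eq_nil_of_le h, PySem.List.enumerate_nil]

theorem occFrom_step (l : List String) (s : String) (x : Nat) (h : x < l.length) :
    occFrom l s x =
      (if s == l[x] then [((x : Nat) : Int)] else []) ++ occFrom l s (x + 1) := by
  unfold occFrom
  rw [List.drop_eq_getElem_cons h, PySem.List.enumerate_cons]
  by_cases he : s = l[x]
  · subst he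
    simp
  · have h1 : (l[x] == s) = false := by simp [Ne.symm he]
    have h2 : (s == l[x]) = false := by simp [he]
    simp only [List.filter_cons, h1, h2, if_false, Bool.false_eq_true]
    norm_num

theorem loop_true (l : List String) (s : String) :
    ∀ n x, l.length - x = n →
      hasSecondLoop l s x true =
        (match occFrom l s x with
         | [] => -1
         | i :: _ => i) := by
  intro n
  induction n with
  | zero =>
    intro x hx
    rw [hasSecondLoop, dif_neg (by omega : ¬ x < l.length), occFrom_ge l s x (by omega)]
  | succ n ih =>
    intro x hx
    have hlt : x < l.length := by omega
    rw [hasSecondLoop, dif_pos hlt, occFrom_step l s x hlt]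
    by_cases he : s == l[x]
    · simp [he]
    · simp only [he, if_false, Bool.false_eq_true, List.nil_append]
      exact ih (x + 1) (by omega)

theorem loop_false (l : List String) (s : String) :
    ∀ n x, l.length - x = n →
      hasSecondLoop l s x false =
        (match occFrom l s x with
         | _ :: j :: _ => j
         | _ => -1) := by
  intro n
  induction n with
  | zero =>
    intro x hx
    rw [hasSecondLoop, dif_neg (by omega : ¬ x < l.length), occFrom_ge l s x (by omega)]
  | succ n ih =>
    intro x hx
    have hlt : x < l.length := by omega
    rw [hasSecondLoop, dif_pos hlt, occFrom_step l s x hlt]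
    by_cases he : s == l[x]
    · simp only [he, if_true, Bool.false_eq_true, List.cons_append, List.nil_append]
      rw [loop_true l s (l.length - (x + 1)) (x + 1) rfl]
      cases occFrom l s (x + 1) <;> rfl
    · simp only [he, if_false, Bool.false_eq_true, List.nil_append]
      exact ih (x + 1) (by omega)

-- the grouping dictionary's entry at s is the occurrence-position list
theorem getD_group_dict (s : String) :
    ∀ (ps : List (Int × String)) (d : PySem.Dict String (List Int)),
      (ps.foldl (fun d p => d.modify p.2 [] (· ++ [p.1])) d).getD s [] =
        d.getD s [] ++ ((ps.filter (fun p => p.2 == s)).map (·.1)) := by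
  intro ps
  induction ps with
  | nil => intro d; simp
  | cons p ps ih =>
    intro d
    simp only [List.foldl_cons, List.filter_cons]
    rw [ih]
    by_cases he : p.2 = s
    · rw [he, PySem.Dict.getD_modify_self]
      simp [List.append_assoc]
    · rw [PySem.Dict.getD_modify]
      simp [Ne.symm he, he]

theorem second_elem_eq (occ : List Int) :
    (match occ with
     | _ :: j :: _ => j
     | _ => (-1 : Int)) = (if h : 1 < occ.length then occ[1] else -1) := by
  match occ with
  | [] => rfl
  | [a] => rfl
  | a :: b :: u => simp

-- ===== VERDICT (by name: the statement is the Claim_ definition above) =====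
theorem has_second_str_spec : Claim_equal_has_second_str := by
  intro l s _
  unfold Spec_has_second_str has_second_str has_second_str_alt
  rw [loop_false l s (l.length - 0) 0 rfl]
  have hocc :
      ((PySem.List.enumerate l 0).foldl
        (fun d p => d.modify p.2 [] (· ++ [p.1]))
        (PySem.Dict.empty : PySem.Dict String (List Int))).getD s [] = occFrom l s 0 := by
    rw [getD_group_dict]
    simp [occFrom]
  simp only [hocc]
  exact second_elem_eq (occFrom l s 0)
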